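-- pv_equiv track=rewrite | github.com/lstama/congak | problem_generator.py | generate_possible_number
-- ===== SOURCE A (Python) =====
-- def next_possible(arr: list, type_arr: list):
--     now = len(arr) - 1
--     plus = True
--     while now >= 0:
--         if plus:
--             plus = False
--             arr[now] += 1
--             if arr[now] == 10:
--                 if type_arr[now] == 'x':
--                     arr[now] = 1
--                 else:
--                     arr[now] = 0
--                 plus = True
--         now -= 1
--     if plus:
--         return -1
--     return arr
--
-- def combine_pattern_with_arr(pattern: str, arr: list):
--     result = ''
--     now = 0
--     for element in pattern:
--         if element == 'x' or element == 'y':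
--             result += str(arr[now])
--             now += 1
--         else:
--             result += element
--     return result
--
-- def generate_possible_number(pattern: str):
--     generated_list = []
--
--     type_arr = []
--     arr = []
--     for element in pattern:
--         if element == 'x':
--             type_arr.append('x')
--             arr.append(1)
--         if element == 'y':
--             type_arr.append('y')
--             arr.append(0)
--
--     if len(arr) == 0:
--         return [pattern]
--
--     generated_list.append(combine_pattern_with_arr(pattern, arr))
--     arr = next_possible(arr, type_arr)
--     while arr != -1:
--         generated_list.append(combine_pattern_with_arr(pattern, arr))
--         arr = next_possible(arr, type_arr)
--     return generated_list
-- ===== SOURCE B (Python) =====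
-- def generate_possible_number(pattern: str):
--     # Build one digit range per variable position, left to right.
--     ranges = []
--     for c in pattern:
--         if c == 'x':
--             ranges.append(list(range(1, 10)))
--         elif c == 'y':
--             ranges.append(list(range(0, 10)))
--     # Cartesian product, last position varying fastest (built right-to-left).
--     combos = [[]]
--     for r in reversed(ranges):
--         combos = [[d] + rest for d in r for rest in combos]
--
--     def render(digits):
--         out = []
--         queue = list(digits)
--         for c in pattern:
--             if c == 'x' or c == 'y':
--                 out.append(str(queue.pop(0)))
--             else:
--                 out.append(c)
--         return ''.join(out)
--
--     return [render(digits) for digits in combos]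
-- ===== Notes on version B (the rewrite author's own statement) =====
-- stated objective: idiomatic
-- what changed: Replaces the in-place odometer (next_possible carry loop re-scanned per output) by building a list of per-position digit ranges, taking their cartesian product right-to-left, and rendering each combination independently.
import Mathlib
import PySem

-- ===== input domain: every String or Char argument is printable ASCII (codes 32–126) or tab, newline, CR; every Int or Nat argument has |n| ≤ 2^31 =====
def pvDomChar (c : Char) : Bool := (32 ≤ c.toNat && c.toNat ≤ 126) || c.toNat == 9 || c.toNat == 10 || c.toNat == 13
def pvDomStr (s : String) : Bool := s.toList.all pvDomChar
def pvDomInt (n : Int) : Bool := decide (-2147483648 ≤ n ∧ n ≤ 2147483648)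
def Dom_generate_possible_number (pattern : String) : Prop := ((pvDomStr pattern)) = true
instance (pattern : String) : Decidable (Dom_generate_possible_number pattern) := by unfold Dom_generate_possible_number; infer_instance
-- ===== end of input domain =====

-- B replaces A's in-place odometer (next_possible) by a cartesian product of per-position
-- digit ranges rendered independently (objective: idiomatic). A mutates its local lists only.

-- ===== PORT A =====
-- while-loop of next_possible: 'now' walks from len(arr)-1 down to 0 mutating arr in place.
-- arr[now]/type_arr[now] are always in range here (now < len), so getD is exact.
def nextLoop (arr : List Int) (type_arr : List Char) (now : Int) (plus : Bool) :
    List Int × Bool :=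
  if h : 0 ≤ now then
    if plus then
      let v := arr.getD now.toNat 0 + 1
      if v = 10 then
        nextLoop (arr.set now.toNat (if type_arr.getD now.toNat ' ' = 'x' then 1 else 0))
          type_arr (now - 1) true
      else
        nextLoop (arr.set now.toNat v) type_arr (now - 1) false
    else
      nextLoop arr type_arr (now - 1) false
  else
    (arr, plus)
termination_by (now + 1).toNat
decreasing_by all_goals omega

-- Python returns -1 (exhausted) or the mutated arr: ported as Option (none = -1).
def next_possible (arr : List Int) (type_arr : List Char) : Option (List Int) :=
  let r := nextLoop arr type_arr ((arr.length : Int) - 1) true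
  if r.2 then none else some r.1

-- the for-loop of combine_pattern_with_arr; 'result' kept as List Char (Python str via String.ofList).
-- arr[now] is always in range in every call A makes, so getD is exact.
def combineGo (arr : List Int) (cs : List Char) (result : List Char) (now : Nat) : List Char :=
  match cs with
  | [] => result
  | c :: rest =>
    if c = 'x' ∨ c = 'y' then
      combineGo arr rest (result ++ PySem.Int.toChars (arr.getD now 0)) (now + 1)
    else
      combineGo arr rest (result ++ [c]) now

def combine_pattern_with_arr (pattern : String) (arr : List Int) : String :=
  String.ofList (combineGo arr pattern.toList [] 0)

-- the first for-loop of generate_possible_number, building type_arr and arr.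
def buildGo (cs : List Char) (type_arr : List Char) (arr : List Int) : List Char × List Int :=
  match cs with
  | [] => (type_arr, arr)
  | c :: rest =>
    let s1 := if c = 'x' then (type_arr ++ ['x'], arr ++ [(1 : Int)]) else (type_arr, arr)
    let s2 := if c = 'y' then (s1.1 ++ ['y'], s1.2 ++ [(0 : Int)]) else s1
    buildGo rest s2.1 s2.2

-- the while loop; fuel 10^|arr| bounds the iteration count (proved sufficient below).
def genLoop (fuel : Nat) (pattern : String) (type_arr : List Char) (arr : List Int)
    (acc : List String) : List String :=
  match fuel with
  | 0 => acc
  | f + 1 =>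
    match next_possible arr type_arr with
    | none => acc
    | some arr' => genLoop f pattern type_arr arr' (acc ++ [combine_pattern_with_arr pattern arr'])

def generate_possible_number (pattern : String) : List String :=
  let ta := buildGo pattern.toList [] []
  if ta.2.length = 0 then [pattern]
  else genLoop (10 ^ ta.2.length) pattern ta.1 ta.2
        [combine_pattern_with_arr pattern ta.2]

-- ===== PORT B =====
def rangesOf (cs : List Char) : List (List Int) :=
  cs.filterMap (fun c =>
    if c = 'x' then some (PySem.List.pyRange 1 10 1)
    else if c = 'y' then some (PySem.List.pyRange 0 10 1)
    else none)

-- Source B builds combos right-to-left: combos = [[d]+rest for d in r for rest in combos].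
def prodLists : List (List Int) → List (List Int)
  | [] => [[]]
  | r :: rs => r.flatMap (fun d => (prodLists rs).map (fun rest => d :: rest))

-- render: queue.pop(0) consumes the digits front-to-back; never called with too few digits,
-- so headD/tail is exact there.
def renderGo (cs : List Char) (ds : List Int) : List Char :=
  match cs with
  | [] => []
  | c :: rest =>
    if c = 'x' ∨ c = 'y' then PySem.Int.toChars (ds.headD 0) ++ renderGo rest ds.tail
    else c :: renderGo rest ds

def generate_possible_number_alt (pattern : String) : List String :=
  (prodLists (rangesOf pattern.toList)).map
    (fun ds => String.ofList (renderGo pattern.toList ds))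

-- ===== PRECONDITION & SPEC =====
def Spec_generate_possible_number (pattern : String) (out : List String) : Prop := out = generate_possible_number_alt pattern
instance (pattern : String) (out : List String) : Decidable (Spec_generate_possible_number pattern out) := by unfold Spec_generate_possible_number; infer_instance

-- ===== CLAIM (what is proved, stated in full; the proofs are below) =====
def Claim_equal_generate_possible_number : Prop := ∀ (pattern : String), Dom_generate_possible_number pattern → Spec_generate_possible_number pattern (generate_possible_number pattern)

-- ===== LEMMAS AND PROOFS =====

-- proof-side vocabulary
def rOf (t : Char) : List Int := if t = 'x' then [1,2,3,4,5,6,7,8,9] else [0,1,2,3,4,5,6,7,8,9]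
def minD (t : Char) : Int := if t = 'x' then 1 else 0
def Valid (ts : List Char) (v : List Int) : Prop := List.Forall₂ (fun t d => minD t ≤ d ∧ d ≤ 9) ts v
def afterL (t : Char) (d : Int) : List Int := (rOf t).filter (fun e => decide (d < e))
def typeArr (cs : List Char) : List Char :=
  cs.filterMap (fun c => if c = 'x' then some 'x' else if c = 'y' then some 'y' else none)

-- purely functional carry-increment equivalent to A's nextLoop pass
def inc : List Char → List Int → List Int × Bool
  | [], _ => ([], true)
  | _ :: _, [] => ([], true)
  | t :: ts, d :: v =>
    let r := inc ts v
    if r.2 then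
      if d + 1 = 10 then ((if t = 'x' then 1 else 0) :: r.1, true)
      else ((d + 1) :: r.1, false)
    else (d :: r.1, false)

-- suffix of the product list starting at state v
def suffixT : List Char → List Int → List (List Int)
  | [], _ => [[]]
  | _ :: _, [] => []
  | t :: ts, d :: v =>
    (suffixT ts v).map (fun rest => d :: rest)
      ++ (afterL t d).flatMap (fun d' => (prodLists (ts.map rOf)).map (fun rest => d' :: rest))

lemma nextLoop_unfold_nonneg (arr : List Int) (ta : List Char) (now : Int) (h : 0 ≤ now)
    (p : Bool) :
    nextLoop arr ta now p =
      (if p then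
        (if arr.getD now.toNat 0 + 1 = 10 then
          nextLoop (arr.set now.toNat (if ta.getD now.toNat ' ' = 'x' then 1 else 0))
            ta (now - 1) true
        else nextLoop (arr.set now.toNat (arr.getD now.toNat 0 + 1)) ta (now - 1) false)
      else nextLoop arr ta (now - 1) false) := by
  rw [nextLoop]; simp [h]

lemma nextLoop_unfold_neg (arr : List Int) (ta : List Char) (now : Int) (h : ¬ 0 ≤ now)
    (p : Bool) : nextLoop arr ta now p = (arr, p) := by
  rw [nextLoop]; simp [h]

lemma nextLoop_false (arr : List Int) (ta : List Char) (n : Int) :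
    nextLoop arr ta n false = (arr, false) := by
  by_cases h : 0 ≤ n
  · have : ((n + 1).toNat) = (n - 1 + 1).toNat + 1 := by omega
    rw [nextLoop_unfold_nonneg arr ta n h false, if_neg (by simp)]
    exact nextLoop_false arr ta (n - 1)
  · exact nextLoop_unfold_neg arr ta n h false
termination_by (n + 1).toNat
decreasing_by omega

lemma nextLoop_zero (arr : List Int) (ta : List Char) (p : Bool) :
    nextLoop arr ta 0 p =
      (if p then
        (if arr.getD 0 0 + 1 = 10 then (arr.set 0 (if ta.getD 0 ' ' = 'x' then 1 else 0), true)
         else (arr.set 0 (arr.getD 0 0 + 1), false))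
       else (arr, false)) := by
  rw [nextLoop_unfold_nonneg _ _ _ le_rfl]
  simp only [Int.toNat_zero]
  split_ifs <;> rw [nextLoop_unfold_neg _ _ _ (by norm_num)]

lemma nextLoop_shift (d : Int) (ds : List Int) (t : Char) (tts : List Char) (j : Nat) (p : Bool) :
    nextLoop (d :: ds) (t :: tts) ((j : Int) + 1) p =
      (let r := nextLoop ds tts (j : Int) p
       if r.2 then
         if d + 1 = 10 then ((if t = 'x' then 1 else 0) :: r.1, true)
         else ((d + 1) :: r.1, false)
       else (d :: r.1, false)) := by
  induction j generalizing ds p with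
  | zero =>
    rw [show ((0 : Nat) : Int) + 1 = 1 from rfl]
    rw [nextLoop_unfold_nonneg _ _ _ (by norm_num)]
    rw [show ((1 : Int)).toNat = 1 from rfl, show (1 : Int) - 1 = 0 from rfl]
    simp only [List.getD_cons_succ, List.set_cons_succ]
    rw [show ((0 : Nat) : Int) = 0 from rfl, nextLoop_zero ds tts p]
    cases p with
    | false =>
      simp only [Bool.false_eq_true, if_false]
      rw [nextLoop_false]
    | true =>
      rw [if_pos rfl]
      split
      · rw [nextLoop_zero]
        simp_all
      · rw [nextLoop_false]
        simp_all
  | succ k ih =>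
    have hc : (((k + 1) : Nat) : Int) = ((k : Nat) : Int) + 1 := by push_cast; ring
    rw [hc]
    rw [nextLoop_unfold_nonneg _ _ _ (by positivity)]
    rw [nextLoop_unfold_nonneg ds tts ((k : Int) + 1) (by positivity)]
    have htn : (((k : Nat) : Int) + 1 + 1).toNat = k + 2 := by omega
    have htn2 : ((k : Nat) : Int) + 1 + 1 - 1 = ((k : Nat) : Int) + 1 := by ring
    have htn3 : (((k : Nat) : Int) + 1).toNat = k + 1 := by omega
    have htn4 : ((k : Nat) : Int) + 1 - 1 = ((k : Nat) : Int) := by ring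
    rw [htn, htn2, htn3, htn4]
    simp only [List.getD_cons_succ, List.set_cons_succ]
    split
    · split
      · rw [ih]
      · rw [ih]
    · rw [ih]

lemma nextLoop_eq_inc (ts : List Char) (arr : List Int) (hlen : ts.length = arr.length)
    (hne : arr ≠ []) :
    nextLoop arr ts ((arr.length : Int) - 1) true = inc ts arr := by
  match arr, ts with
  | [], _ => exact absurd rfl hne
  | d :: ds, [] => simp at hlen
  | [d], t :: t' :: tts => simp at hlen
  | [d], [t] =>
    rw [show (([d] : List Int).length : Int) - 1 = 0 by simp]
    rw [nextLoop_unfold_nonneg _ _ _ le_rfl]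
    simp only [Int.toNat_zero, List.getD_cons_zero, List.set_cons_zero]
    show _ = inc [t] [d]
    simp only [inc]
    split
    all_goals simp [nextLoop_unfold_neg _ _ _ (show ¬ (0:Int) ≤ -1 by norm_num)]
  | d :: e :: es, t :: tts =>
    have hlen' : tts.length = (e :: es).length := by simpa using hlen
    have hcast : (((d :: e :: es : List Int).length : Int)) - 1 = ((es.length : Nat) : Int) + 1 := by
      push_cast [List.length_cons]; ring
    rw [hcast, nextLoop_shift]
    have hinner : ((es.length : Nat) : Int) = (((e :: es : List Int).length : Int)) - 1 := by
      simp
    rw [hinner, nextLoop_eq_inc tts (e :: es) hlen' (by simp)]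
    conv_rhs => rw [inc]

lemma next_possible_eq (ts : List Char) (arr : List Int) (hlen : ts.length = arr.length)
    (hne : arr ≠ []) :
    next_possible arr ts = if (inc ts arr).2 then none else some (inc ts arr).1 := by
  unfold next_possible
  rw [nextLoop_eq_inc ts arr hlen hne]

lemma afterL_succ (t : Char) (d : Int) (h1 : minD t ≤ d) (h2 : d ≤ 9) (h3 : d + 1 ≠ 10) :
    afterL t d = (d + 1) :: afterL t (d + 1) := by
  have h2' : d ≤ 8 := by omega
  by_cases ht : t = 'x'
  · subst ht
    simp only [afterL, rOf, minD, reduceIte] at h1 ⊢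
    interval_cases d <;> decide
  · simp only [afterL, rOf, minD, if_neg ht] at h1 ⊢
    interval_cases d <;> decide

lemma afterL_nine (t : Char) : afterL t 9 = [] := by
  by_cases ht : t = 'x' <;> simp [afterL, rOf, ht]

lemma afterL_min (t : Char) : afterL t (minD t) = (rOf t).tail := by
  by_cases ht : t = 'x' <;> simp [afterL, rOf, minD, ht]

lemma valid_mins (ts : List Char) : Valid ts (ts.map minD) := by
  induction ts with
  | nil => exact List.Forall₂.nil
  | cons t ts ih =>
    refine List.Forall₂.cons ⟨le_refl _, ?_⟩ ih
    unfold minD; split <;> norm_num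

lemma rOf_cons (t : Char) : rOf t = minD t :: (rOf t).tail := by
  by_cases ht : t = 'x' <;> simp [rOf, minD, ht]

lemma suffixT_mins (ts : List Char) : suffixT ts (ts.map minD) = prodLists (ts.map rOf) := by
  induction ts with
  | nil => rfl
  | cons t ts ih =>
    simp only [List.map_cons, suffixT, prodLists]
    rw [ih, afterL_min]
    conv_rhs => rw [rOf_cons t]
    rw [List.flatMap_cons]

-- the step lemma: inc advances to the next element of the product list
lemma inc_step (ts : List Char) (v : List Int) (h : Valid ts v) :
    (if (inc ts v).2 then suffixT ts v = [v] ∧ (inc ts v).1 = ts.map minD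
     else suffixT ts v = v :: suffixT ts (inc ts v).1 ∧ Valid ts (inc ts v).1) := by
  induction h with
  | nil => simp [inc, suffixT]
  | @cons t d ts v hd htail ih =>
    obtain ⟨hmin, h9⟩ := hd
    show (if (inc (t :: ts) (d :: v)).2 then _ else _)
    simp only [inc]
    by_cases hr : (inc ts v).2
    · rw [if_pos hr] at ih
      obtain ⟨hsuf, hmins⟩ := ih
      by_cases h10 : d + 1 = 10
      · simp only [hr, if_true, h10]
        constructor
        · have hd9 : d = 9 := by omega
          subst hd9
          show (suffixT ts v).map _ ++ _ = _
          rw [hsuf, afterL_nine]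
          simp
        · simp only [List.map_cons, hmins]
          congr 1
      · simp only [hr, if_true, h10, Bool.false_eq_true, if_false]
        have hb : minD t ≤ d + 1 ∧ d + 1 ≤ 9 := ⟨by omega, by omega⟩
        constructor
        · show (suffixT ts v).map _ ++ _ = _
          rw [hsuf, afterL_succ t d hmin h9 h10]
          rw [List.flatMap_cons]
          show _ = (d :: v) :: ((suffixT ts ((inc ts v).1)).map _ ++ _)
          rw [hmins, suffixT_mins]
          simp
        · exact List.Forall₂.cons hb (hmins ▸ valid_mins ts)
    · rw [if_neg hr] at ih
      obtain ⟨hsuf, hval⟩ := ih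
      simp only [hr, Bool.false_eq_true, if_false]
      constructor
      · show (suffixT ts v).map _ ++ _ = _
        rw [hsuf]
        show _ = (d :: v) :: ((suffixT ts ((inc ts v).1)).map _ ++ _)
        simp
      · exact List.Forall₂.cons ⟨hmin, h9⟩ hval

lemma suffixT_head (ts : List Char) (v : List Int) (h : Valid ts v) :
    suffixT ts v = v :: (suffixT ts v).tail := by
  have := inc_step ts v h
  split at this <;> rw [this.1] <;> rfl

lemma prodLists_len_le (ts : List Char) :
    (prodLists (ts.map rOf)).length ≤ 10 ^ ts.length := by
  induction ts with
  | nil => simp [prodLists]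
  | cons t ts ih =>
    simp only [List.map_cons, prodLists, List.length_flatMap, List.length_cons, pow_succ]
    have hr : (rOf t).length ≤ 10 := by
      by_cases ht : t = 'x' <;> simp [rOf, ht]
    calc ((rOf t).map (fun d => ((prodLists (ts.map rOf)).map (fun rest => d :: rest)).length)).sum
        = (rOf t).length * (prodLists (ts.map rOf)).length := by
          rw [List.map_congr_left (fun d _ => by rw [List.length_map])]
          simp [List.map_const', List.sum_replicate, smul_eq_mul]
      _ ≤ 10 ^ ts.length * 10 := by
          calc (rOf t).length * (prodLists (ts.map rOf)).length
              ≤ 10 * 10 ^ ts.length := Nat.mul_le_mul hr ih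
            _ = 10 ^ ts.length * 10 := by ring

lemma suffixT_len_le (ts : List Char) (v : List Int) (h : Valid ts v) :
    (suffixT ts v).length ≤ 10 ^ ts.length := by
  induction h with
  | nil => simp [suffixT]
  | @cons t d ts v hd htail ih =>
    obtain ⟨hmin, h9⟩ := hd
    have hafter : (afterL t d).length ≤ 9 := by
      by_cases ht : t = 'x'
      · subst ht
        simp only [minD, reduceIte] at hmin
        simp only [afterL, rOf, reduceIte]
        interval_cases d <;> decide
      · simp only [minD, if_neg ht] at hmin
        simp only [afterL, rOf, if_neg ht]
        interval_cases d <;> decide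
    show ((suffixT ts v).map _ ++ (afterL t d).flatMap _).length ≤ _
    rw [List.length_append, List.length_map, List.length_flatMap]
    have hfm : ((afterL t d).map
        (fun d' => ((prodLists (ts.map rOf)).map (fun rest => d' :: rest)).length)).sum
        ≤ 9 * 10 ^ ts.length := by
      rw [List.map_congr_left (fun d' _ => by rw [List.length_map])]
      rw [List.map_const', List.sum_replicate, smul_eq_mul]
      exact Nat.mul_le_mul hafter (prodLists_len_le ts)
    calc (suffixT ts v).length + _ ≤ 10 ^ ts.length + 9 * 10 ^ ts.length :=
          Nat.add_le_add ih hfm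
      _ = 10 ^ (t :: ts : List Char).length := by simp [pow_succ]; ring

lemma genLoop_eq (p : String) (ts : List Char) (hts : ts ≠ []) :
    ∀ (n : Nat) (v : List Int) (acc : List String), Valid ts v →
      (suffixT ts v).length ≤ n →
      genLoop n p ts v acc = acc ++ ((suffixT ts v).tail).map (combine_pattern_with_arr p) := by
  intro n
  induction n with
  | zero =>
    intro v acc hval hlen
    rw [suffixT_head ts v hval] at hlen
    simp at hlen
  | succ n ih =>
    intro v acc hval hlen
    have hlens : ts.length = v.length := hval.length_eq
    have hvne : v ≠ [] := by
      cases v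
      · cases ts
        · exact absurd rfl hts
        · exact absurd hlens.symm (by simp)
      · simp
    show (match next_possible v ts with
      | none => acc
      | some arr' => genLoop n p ts arr' (acc ++ [combine_pattern_with_arr p arr'])) = _
    rw [next_possible_eq ts v hlens hvne]
    have hstep := inc_step ts v hval
    by_cases hflag : (inc ts v).2
    · rw [if_pos hflag] at hstep ⊢
      rw [hstep.1]
      simp
    · rw [if_neg hflag] at hstep ⊢
      obtain ⟨hsuf, hval'⟩ := hstep
      have hlen' : (suffixT ts (inc ts v).1).length ≤ n := by
        rw [hsuf] at hlen; simpa using hlen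
      show genLoop n p ts (inc ts v).1 _ = _
      rw [ih (inc ts v).1 _ hval' hlen']
      rw [hsuf]
      rw [suffixT_head ts (inc ts v).1 hval']
      simp

lemma combineGo_eq_renderGo (arr : List Int) (cs : List Char) :
    ∀ (res : List Char) (now : Nat),
      combineGo arr cs res now = res ++ renderGo cs (arr.drop now) := by
  induction cs with
  | nil => intro res now; simp [combineGo, renderGo]
  | cons c cs ih =>
    intro res now
    show (if c = 'x' ∨ c = 'y' then _ else _) = _
    by_cases hc : c = 'x' ∨ c = 'y'
    · rw [if_pos hc]
      rw [ih]
      have hg : arr.getD now 0 = (arr.drop now).headD 0 := by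
        rw [List.headD_eq_head?_getD, List.head?_drop]; simp [List.getD]
      have ht : arr.drop (now + 1) = (arr.drop now).tail := List.tail_drop.symm
      rw [hg, ht]
      show _ = res ++ (if c = 'x' ∨ c = 'y' then _ else _)
      rw [if_pos hc]
      simp
    · rw [if_neg hc, ih]
      show _ = res ++ (if c = 'x' ∨ c = 'y' then _ else _)
      rw [if_neg hc]
      simp

lemma buildGo_eq (cs : List Char) :
    ∀ (ta : List Char) (arr : List Int),
      buildGo cs ta arr = (ta ++ typeArr cs, arr ++ (typeArr cs).map minD) := by
  induction cs with
  | nil => intro ta arr; simp [buildGo, typeArr]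
  | cons c cs ih =>
    intro ta arr
    show buildGo cs _ _ = _
    by_cases hx : c = 'x'
    · subst hx
      simp only [reduceIte]
      rw [ih]
      simp [typeArr, minD]
    · by_cases hy : c = 'y'
      · subst hy
        simp only [if_neg (by decide : ¬ ('y' : Char) = 'x'), reduceIte]
        rw [ih]
        simp [typeArr, minD]
      · simp only [if_neg hx, if_neg hy]
        rw [ih]
        simp [typeArr, if_neg hx, if_neg hy]

lemma rangesOf_eq (cs : List Char) : rangesOf cs = (typeArr cs).map rOf := by
  induction cs with
  | nil => rfl
  | cons c cs ih =>
    simp only [rangesOf, typeArr, List.filterMap_cons] at *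
    by_cases hx : c = 'x'
    · subst hx
      simp only [reduceIte, List.map_cons]
      rw [ih, show (PySem.List.pyRange 1 10 1 : List Int) = rOf 'x' from by decide]
    · by_cases hy : c = 'y'
      · subst hy
        simp only [reduceIte, if_neg (by decide : ¬ ('y' : Char) = 'x'), List.map_cons]
        rw [ih, show (PySem.List.pyRange 0 10 1 : List Int) = rOf 'y' from by decide]
      · simp only [if_neg hx, if_neg hy]
        exact ih

lemma renderGo_novar (cs : List Char) (h : typeArr cs = []) (ds : List Int) :
    renderGo cs ds = cs := by
  induction cs generalizing ds with
  | nil => rfl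
  | cons c cs ih =>
    simp only [typeArr, List.filterMap_cons] at h
    by_cases hx : c = 'x'
    · subst hx; simp at h
    · by_cases hy : c = 'y'
      · subst hy; simp at h
      · simp only [if_neg hx, if_neg hy] at h
        show (if c = 'x' ∨ c = 'y' then _ else _) = _
        rw [if_neg (by tauto)]
        rw [ih h]

-- ===== VERDICT (by name: the statement is the Claim_ definition above) =====
lemma combine_eq_render (pattern : String) (ds : List Int) :
    combine_pattern_with_arr pattern ds = String.ofList (renderGo pattern.toList ds) := by
  unfold combine_pattern_with_arr
  rw [combineGo_eq_renderGo ds pattern.toList [] 0]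
  simp

-- ===== VERDICT (by name: the statement is the Claim_ definition above) =====
theorem generate_possible_number_spec : Claim_equal_generate_possible_number := by
  intro pattern _
  show generate_possible_number pattern = generate_possible_number_alt pattern
  unfold generate_possible_number generate_possible_number_alt
  rw [buildGo_eq pattern.toList [] []]
  simp only [List.nil_append]
  by_cases hnil : typeArr pattern.toList = []
  · rw [hnil, rangesOf_eq, hnil]
    simp only [List.map_nil, List.length_nil, reduceIte, prodLists, List.map_cons,
      List.map_nil]
    rw [renderGo_novar pattern.toList hnil, String.ofList_toList]
  · have hval := valid_mins (typeArr pattern.toList)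
    have hbound : (suffixT (typeArr pattern.toList) ((typeArr pattern.toList).map minD)).length
        ≤ 10 ^ ((typeArr pattern.toList).map minD).length := by
      rw [List.length_map]
      exact suffixT_len_le _ _ hval
    rw [if_neg (by simpa using hnil)]
    rw [genLoop_eq pattern (typeArr pattern.toList) hnil _ _ _ hval hbound]
    rw [rangesOf_eq, ← suffixT_mins]
    conv_rhs => rw [suffixT_head _ _ hval]
    rw [List.map_cons, List.singleton_append]
    rw [combine_eq_render]
    congr 1
    exact List.map_congr_left (fun ds _ => combine_eq_render pattern ds)
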